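-- pv_equiv track=rewrite | github.com/pypi-data/pypi-mirror-210 | packages/acwater/acwater-0.3.1.tar.gz/acwater-0.3.1/acwater/polymer_enmap.py | filter_bands
-- ===== SOURCE A (Python) =====
-- def filter_bands(bands, detector):
--     # ------------------------------------------------------------
--     # selection based on absorption features (H20, O3)
--     # reference: https://amt.copernicus.org/articles/11/3205/2018/
--     # ------------------------------------------------------------
--     exact_bands_ = [550, 630, 690, 720, 760, 820, 940, 1060, 1100, 1270, 1380,
--                    1400, 1580, 1600, 1870, 2000]  # strong absorption bands of O3 and NO2
--     delta_wl = 1.5  # delta wavelength to search for be removed from bands_wavelength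
--
--     if detector == 'vnir':
--         bands_wavelength = [x for x in bands if x < 1000]  # use only bands below 780 nm as hard-code previous version
--     else:
--         bands_wavelength = [x for x in bands if x < 1300]
--
--     bands_to_remove = []  # create list for store actual bands to be removed
--
--     for rb in exact_bands_:
--         tmp = [x for x in bands_wavelength if x >= rb - delta_wl]
--         bands_to_remove.extend([x for x in tmp if x <= rb + delta_wl])
--
--     bands_to_use = [x for x in bands_wavelength if x not in bands_to_remove]
--
--     # select band for cloud mask, !!Need to be check again if this is the right band
--     band_cloudmask = [x for x in bands if x >= 863 - delta_wl]
--     band_cloudmask = [x for x in band_cloudmask if x <= 863 + delta_wl]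
--
--     return bands_to_use, band_cloudmask[0]
-- ===== SOURCE B (Python) =====
-- def filter_bands(bands, detector):
--     exact_bands_ = [550, 630, 690, 720, 760, 820, 940, 1060, 1100, 1270, 1380,
--                     1400, 1580, 1600, 1870, 2000]
--     delta_wl = 1.5
--     limit = 1000 if detector == 'vnir' else 1300
--     bands_to_use = [x for x in bands
--                     if x < limit
--                     and not any(rb - delta_wl <= x <= rb + delta_wl for rb in exact_bands_)]
--     cloudmask = next(x for x in bands if 863 - delta_wl <= x <= 863 + delta_wl)
--     return bands_to_use, cloudmask
-- ===== Notes on version B (the rewrite author's own statement) =====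
-- stated objective: simpler
-- what changed: B drops the intermediate bands_to_remove list (built by a per-reference-band scan and then re-scanned by a membership test) and instead filters bands in one pass with a direct any()-predicate, and picks the cloudmask band with next() instead of building two filtered lists; Pre_ excludes inputs with no band in [861.5,864.5], where A raises IndexError (and B StopIteration).
import Mathlib
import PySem

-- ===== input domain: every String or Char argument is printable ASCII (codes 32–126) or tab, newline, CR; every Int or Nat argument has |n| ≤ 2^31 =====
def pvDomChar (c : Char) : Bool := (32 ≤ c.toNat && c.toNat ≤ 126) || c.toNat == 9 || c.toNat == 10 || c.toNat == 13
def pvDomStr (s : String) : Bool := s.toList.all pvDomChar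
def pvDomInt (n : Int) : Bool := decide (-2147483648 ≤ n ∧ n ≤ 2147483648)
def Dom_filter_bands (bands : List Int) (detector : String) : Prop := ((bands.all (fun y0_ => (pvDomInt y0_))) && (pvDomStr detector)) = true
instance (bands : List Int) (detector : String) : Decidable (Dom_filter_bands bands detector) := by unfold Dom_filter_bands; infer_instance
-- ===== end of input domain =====

-- B replaces A's build-then-scan removal list by one direct predicate pass per band (objective: simpler).
-- Integer bands compared against rb ± 1.5 are ported exactly via doubled integers: x ≥ rb - 1.5 ↔ 2*x ≥ 2*rb - 3.

-- ===== PORT A =====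
def exactBands_ : List Int := [550, 630, 690, 720, 760, 820, 940, 1060, 1100, 1270, 1380,
                               1400, 1580, 1600, 1870, 2000]

def filter_bands (bands : List Int) (detector : String) : List Int × Int :=
  let bands_wavelength :=
    if detector = "vnir" then bands.filter (fun x => x < 1000)
    else bands.filter (fun x => x < 1300)
  let bands_to_remove :=
    exactBands_.foldl (fun acc rb =>
      acc ++ ((bands_wavelength.filter (fun x => 2*x ≥ 2*rb - 3)).filter
                (fun x => 2*x ≤ 2*rb + 3))) []
  let bands_to_use := bands_wavelength.filter (fun x => ¬ x ∈ bands_to_remove)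
  let bcm := (bands.filter (fun x => 2*x ≥ 2*863 - 3)).filter (fun x => 2*x ≤ 2*863 + 3)
  -- band_cloudmask[0]: Pre_ guarantees bcm ≠ []; Python raises IndexError outside Pre_
  (bands_to_use, bcm.headD 0)

-- ===== PORT B =====
def filter_bands_alt (bands : List Int) (detector : String) : List Int × Int :=
  let limit : Int := if detector = "vnir" then 1000 else 1300
  let bands_to_use := bands.filter (fun x =>
    x < limit ∧ ¬ exactBands_.any (fun rb => 2*rb - 3 ≤ 2*x ∧ 2*x ≤ 2*rb + 3))
  -- next(...): Pre_ guarantees a match; Python raises StopIteration outside Pre_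
  let cloudmask := (bands.find? (fun x => decide (2*863 - 3 ≤ 2*x ∧ 2*x ≤ 2*863 + 3))).getD 0
  (bands_to_use, cloudmask)

-- ===== PRECONDITION & SPEC =====
-- Pre_ excludes exactly the inputs with no band within 1.5 of 863, on which the Python A raises
-- IndexError on band_cloudmask[0] (and B raises StopIteration).
def Pre_filter_bands (bands : List Int) (detector : String) : Prop :=
  ∃ x ∈ bands, 862 ≤ x ∧ x ≤ 864
instance (bands : List Int) (detector : String) : Decidable (Pre_filter_bands bands detector) := by
  unfold Pre_filter_bands; infer_instance
def pvWitness_filter_bands : List Int × String := ([500, 863, 1100], "vnir")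

def Spec_filter_bands (bands : List Int) (detector : String) (out : List Int × Int) : Prop :=
  out = filter_bands_alt bands detector
instance (bands : List Int) (detector : String) (out : List Int × Int) : Decidable (Spec_filter_bands bands detector out) := by
  unfold Spec_filter_bands; infer_instance

-- ===== CLAIM (what is proved, stated in full; the proofs are below) =====
def Claim_equal_filter_bands : Prop := ∀ (bands : List Int) (detector : String), Dom_filter_bands bands detector → Pre_filter_bands bands detector → Spec_filter_bands bands detector (filter_bands bands detector)

-- ===== LEMMAS AND PROOFS =====

-- membership in A's bands_to_remove list, for an arbitrary reference list eb and base list bw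
theorem mem_removeList (eb bw : List Int) (x : Int) :
    x ∈ eb.foldl (fun acc rb =>
      acc ++ ((bw.filter (fun x => 2*x ≥ 2*rb - 3)).filter (fun x => 2*x ≤ 2*rb + 3))) []
    ↔ ∃ rb ∈ eb, x ∈ bw ∧ 2*rb - 3 ≤ 2*x ∧ 2*x ≤ 2*rb + 3 := by
  rw [PySem.List.foldl_append_eq_flatMap]
  simp only [List.nil_append, List.mem_flatMap, List.mem_filter, decide_eq_true_eq, ge_iff_le]
  exact ⟨fun ⟨rb,h1,⟨h2,h3⟩,h4⟩ => ⟨rb,h1,h2,h3,h4⟩, fun ⟨rb,h1,h2,h3,h4⟩ => ⟨rb,h1,⟨h2,h3⟩,h4⟩⟩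

theorem head?_filter (p : Int → Bool) (l : List Int) :
    (l.filter p).head? = l.find? p := by
  induction l with
  | nil => rfl
  | cons a t ih => by_cases h : p a <;> simp [List.find?, h, ih]

-- A's two-stage removal (build bands_to_remove, then membership-filter) equals B's one-pass predicate filter
theorem use_eq (eb bands : List Int) (L : Int) :
    (bands.filter (fun x => x < L)).filter (fun x => ¬ x ∈ eb.foldl (fun acc rb =>
        acc ++ (((bands.filter (fun x => x < L)).filter (fun x => 2*x ≥ 2*rb - 3)).filter
                  (fun x => 2*x ≤ 2*rb + 3))) [])
    = bands.filter (fun x => x < L ∧ ¬ eb.any (fun rb => 2*rb - 3 ≤ 2*x ∧ 2*x ≤ 2*rb + 3)) := by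
  rw [List.filter_congr (q := fun x => !eb.any (fun rb => decide (2*rb - 3 ≤ 2*x ∧ 2*x ≤ 2*rb + 3)))
      ?_, List.filter_filter]
  · apply List.filter_congr
    intro x _
    simp only [Bool.decide_and, decide_not, Bool.decide_eq_true, Bool.and_comm]
  · intro x hx
    simp only [List.mem_filter, decide_eq_true_eq] at hx
    simp only [decide_not]
    congr 1
    rw [Bool.eq_iff_iff]
    simp only [decide_eq_true_eq, List.any_eq_true]
    rw [mem_removeList]
    constructor
    · rintro ⟨rb, hrb, _, hc⟩; exact ⟨rb, hrb, hc⟩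
    · rintro ⟨rb, hrb, hc⟩
      exact ⟨rb, hrb, by simp [List.mem_filter, hx.1, hx.2], hc⟩

theorem filter_bands_eq (bands : List Int) (detector : String) :
    filter_bands bands detector = filter_bands_alt bands detector := by
  simp only [filter_bands, filter_bands_alt]
  by_cases hd : detector = "vnir" <;>
  · simp only [hd, ite_true, ite_false]
    refine Prod.ext ?_ ?_
    · exact use_eq exactBands_ bands _
    · simp only [List.filter_filter, List.headD_eq_head?_getD, head?_filter]
      congr 2
      funext x
      simp only [Bool.decide_and, ge_iff_le, Bool.and_comm]

-- ===== VERDICT (by name: the statement is the Claim_ definition above) =====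
theorem filter_bands_spec : Claim_equal_filter_bands := by
  intro bands detector _ _
  exact filter_bands_eq bands detector
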